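-- pv_equiv track=rewrite | github.com/A7uly/quantization | Quantization.py | SS_Matrix
-- ===== SOURCE A (Python) =====
-- def SS_Matrix(G):
--     # G = the number of groups
--     B = [['*' for x in range(G)] for y in range(G)]
--     for g in range(G - 1):
--         for r in range(G - g - 1):
--             l = 2 * g + r
--             B[l % G][g] = g
--             B[l % G][g + r + 1] = g
--     for i in range(G):
--         for j in range(G):
--             if B[i][j] == '*':
--                 B[i][j] = j
--     return B
-- ===== SOURCE B (Python) =====
-- def SS_Matrix(G):
--     # Closed form: in A's round-robin fill every cell (i, j) is written at most
--     # once, and the value that ends up there (after A resolves the '*' cells to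
--     # their column index) is exactly min((i + 1 - j) % G, j).
--     return [[min((i + 1 - j) % G, j) for j in range(G)] for i in range(G)]
-- ===== Notes on version B (the rewrite author's own statement) =====
-- stated objective: simpler
-- what changed: Replaces the two-pass sentinel fill (round-robin writes into a '*'-matrix, then a scan resolving sentinels) by a direct per-cell closed form min((i+1-j)%G, j).
import Mathlib
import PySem

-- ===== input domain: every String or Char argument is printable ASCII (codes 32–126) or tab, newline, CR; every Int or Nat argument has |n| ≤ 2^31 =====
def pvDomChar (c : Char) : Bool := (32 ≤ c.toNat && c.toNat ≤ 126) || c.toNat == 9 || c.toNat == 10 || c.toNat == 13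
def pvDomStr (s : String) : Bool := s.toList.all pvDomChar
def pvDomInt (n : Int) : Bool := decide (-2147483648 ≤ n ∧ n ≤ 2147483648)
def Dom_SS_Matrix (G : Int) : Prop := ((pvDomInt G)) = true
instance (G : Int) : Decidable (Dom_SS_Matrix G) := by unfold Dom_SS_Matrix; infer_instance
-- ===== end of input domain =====

-- B replaces A's two-pass sentinel fill by a direct per-cell closed form (objective: simpler).

-- ===== PORT A =====
-- Python cells hold '*' or an int; modelled as Option Int (none = '*').
-- 'B[a][b] = v': indices in A are always nonnegative and in range, where this is exact.
def pvSetCell (m : List (List (Option Int))) (a b v : Int) : List (List (Option Int)) :=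
  m.set a.toNat ((m.getD a.toNat []).set b.toNat (some v))

-- 'B[i][j]' read (in range wherever A reads)
def pvGetCell (m : List (List (Option Int))) (a b : Int) : Option Int :=
  (m.getD a.toNat []).getD b.toNat none

def SS_Matrix (G : Int) : List (List Int) :=
  let B0 : List (List (Option Int)) :=
    (PySem.List.pyRange 0 G 1).map (fun _ => (PySem.List.pyRange 0 G 1).map (fun _ => (none : Option Int)))
  let B1 := (PySem.List.pyRange 0 (G-1) 1).foldl (fun B g =>
    (PySem.List.pyRange 0 (G-g-1) 1).foldl (fun B r =>
      let l := 2*g+r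
      let B' := pvSetCell B (PySem.Int.mod l G) g g
      pvSetCell B' (PySem.Int.mod l G) (g+r+1) g) B) B0
  let B2 := (PySem.List.pyRange 0 G 1).foldl (fun B i =>
    (PySem.List.pyRange 0 G 1).foldl (fun B j =>
      if pvGetCell B i j = none then pvSetCell B i j j else B) B) B1
  -- after the second pass no cell is none; unwrap the Option representation
  B2.map (fun row => row.map (fun c => c.getD 0))

-- ===== PORT B =====
def SS_Matrix_alt (G : Int) : List (List Int) :=
  (PySem.List.pyRange 0 G 1).map (fun i =>
    (PySem.List.pyRange 0 G 1).map (fun j => min (PySem.Int.mod (i + 1 - j) G) j))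

-- ===== PRECONDITION & SPEC =====
def Spec_SS_Matrix (G : Int) (out : List (List Int)) : Prop := out = SS_Matrix_alt G
instance (G : Int) (out : List (List Int)) : Decidable (Spec_SS_Matrix G out) := by unfold Spec_SS_Matrix; infer_instance

-- ===== CLAIM (what is proved, stated in full; the proofs are below) =====
def Claim_equal_SS_Matrix : Prop := ∀ (G : Int), Dom_SS_Matrix G → Spec_SS_Matrix G (SS_Matrix G)

-- ===== LEMMAS AND PROOFS =====

-- one round-robin write, and the flat list of all writes the fill loop performs
def pvUpd (m : List (List (Option Int))) (u : Int × Int × Int) : List (List (Option Int)) :=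
  pvSetCell m u.1 u.2.1 u.2.2

def pvUpds (G : Int) : List (Int × Int × Int) :=
  (PySem.List.pyRange 0 (G-1) 1).flatMap (fun g =>
    (PySem.List.pyRange 0 (G-g-1) 1).flatMap (fun r =>
      [(PySem.Int.mod (2*g+r) G, g, g), (PySem.Int.mod (2*g+r) G, g+r+1, g)]))

-- the fill loop is the fold of its write list
lemma fill_eq_upds (G : Int) (B : List (List (Option Int))) :
    (PySem.List.pyRange 0 (G-1) 1).foldl (fun B g =>
      (PySem.List.pyRange 0 (G-g-1) 1).foldl (fun B r =>
        let l := 2*g+r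
        let B' := pvSetCell B (PySem.Int.mod l G) g g
        pvSetCell B' (PySem.Int.mod l G) (g+r+1) g) B) B
      = (pvUpds G).foldl pvUpd B := by
  unfold pvUpds
  rw [List.foldl_flatMap]
  simp only [List.foldl_flatMap, List.foldl_cons, List.foldl_nil, pvUpd]

lemma getD_set_self {α : Type} (l : List α) (a : Nat) (x d : α) (h : a < l.length) :
    (l.set a x).getD a d = x := by
  rw [List.getD_eq_getElem?_getD, List.getElem?_set_self (by simpa using h)]
  rfl

lemma getD_set_ne {α : Type} (l : List α) (a k : Nat) (x d : α) (h : a ≠ k) :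
    (l.set a x).getD k d = l.getD k d := by
  rw [List.getD_eq_getElem?_getD, List.getElem?_set_ne h, ← List.getD_eq_getElem?_getD]

-- shape preservation
lemma len_upd (m : List (List (Option Int))) (u : Int × Int × Int) :
    (pvUpd m u).length = m.length := by
  simp [pvUpd, pvSetCell]

lemma rowlen_upd (m : List (List (Option Int))) (u : Int × Int × Int) (k : Nat) :
    ((pvUpd m u).getD k []).length = (m.getD k []).length := by
  unfold pvUpd pvSetCell
  by_cases h : u.1.toNat = k
  · subst h
    by_cases hk : u.1.toNat < m.length
    · rw [getD_set_self _ _ _ _ hk, List.length_set]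
    · rw [List.getD_eq_getElem?_getD, List.getD_eq_getElem?_getD,
        List.getElem?_eq_none (by simpa using le_of_not_gt hk),
        List.getElem?_eq_none (le_of_not_gt hk)]
  · rw [getD_set_ne _ _ _ _ _ h]

lemma len_foldl_upd (us : List (Int × Int × Int)) (m : List (List (Option Int))) :
    (us.foldl pvUpd m).length = m.length := by
  induction us generalizing m with
  | nil => rfl
  | cons u rest ih => rw [List.foldl_cons, ih, len_upd]

lemma rowlen_foldl_upd (us : List (Int × Int × Int)) (m : List (List (Option Int))) (k : Nat) :
    ((us.foldl pvUpd m).getD k []).length = (m.getD k []).length := by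
  induction us generalizing m with
  | nil => rfl
  | cons u rest ih => rw [List.foldl_cons, ih, rowlen_upd]

-- the cell (i, j) after a list of writes that all write the same value v there
lemma foldl_upd_cell (us : List (Int × Int × Int)) (m : List (List (Option Int)))
    (i j : Nat) (v : Int) (hi : i < m.length) (hj : j < (m.getD i []).length)
    (hv : ∀ u ∈ us, u.1.toNat = i → u.2.1.toNat = j → u.2.2 = v) :
    ((us.foldl pvUpd m).getD i []).getD j none
      = if us.any (fun u => u.1.toNat == i && u.2.1.toNat == j) then some v
        else (m.getD i []).getD j none := by
  revert hv
  revert m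
  induction us with
  | nil => intro m hi hj hv; simp
  | cons u rest ih =>
    intro m hi hj hv
    rw [List.foldl_cons, List.any_cons]
    have hi' : i < (pvUpd m u).length := by rw [len_upd]; exact hi
    have hj' : j < ((pvUpd m u).getD i []).length := by rw [rowlen_upd]; exact hj
    have hv' : ∀ u' ∈ rest, u'.1.toNat = i → u'.2.1.toNat = j → u'.2.2 = v :=
      fun u' hu' => hv u' (by simp [hu'])
    by_cases h1 : u.1.toNat = i
    · by_cases h2 : u.2.1.toNat = j
      · have hvv : u.2.2 = v := hv u (by simp) h1 h2
        have hcell : ((pvUpd m u).getD i []).getD j none = some v := by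
          unfold pvUpd pvSetCell
          rw [h1, getD_set_self _ _ _ _ hi, h2, getD_set_self _ _ _ _ hj, hvv]
        rw [ih (pvUpd m u) hi' hj' hv', hcell]
        simp [h1, h2]
      · have hcell : ((pvUpd m u).getD i []).getD j none = (m.getD i []).getD j none := by
          unfold pvUpd pvSetCell
          rw [h1, getD_set_self _ _ _ _ hi, getD_set_ne _ _ _ _ _ h2]
        rw [ih (pvUpd m u) hi' hj' hv', hcell]
        have hhead : (u.1.toNat == i && u.2.1.toNat == j) = false := by simp [h2]
        rw [hhead, Bool.false_or]
    · have hcell : ((pvUpd m u).getD i []).getD j none = (m.getD i []).getD j none := by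
        unfold pvUpd pvSetCell
        rw [getD_set_ne _ _ _ _ _ h1]
      rw [ih (pvUpd m u) hi' hj' hv', hcell]
      have hhead : (u.1.toNat == i && u.2.1.toNat == j) = false := by simp [h1]
      rw [hhead, Bool.false_or]

-- arithmetic: a % G = b when G divides a - b and 0 ≤ b < G
lemma emod_eq_of_dvd_sub (a b G : Int) (h : G ∣ (a - b)) (hb0 : 0 ≤ b) (hbG : b < G) :
    a % G = b := by
  have h1 : a % G = b % G := Int.emod_eq_emod_iff_emod_sub_eq_zero.mpr (Int.emod_eq_zero_of_dvd h)
  rw [h1, Int.emod_eq_of_lt hb0 hbG]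

-- every write of the fill loop landing on cell (i, j) writes min ((i+1-j) % G) j
lemma upds_value (G : Int) (hG : 0 < G) (i j : Nat) :
    ∀ u ∈ pvUpds G, u.1.toNat = i → u.2.1.toNat = j →
      u.2.2 = min (((i : Int) + 1 - (j : Int)) % G) (j : Int) := by
  intro u hu h1 h2
  simp only [pvUpds, List.mem_flatMap, PySem.List.mem_pyRange_one, List.mem_cons,
    List.not_mem_nil, or_false] at hu
  obtain ⟨g, ⟨hg0, hg1⟩, r, ⟨hr0, hr1⟩, hu⟩ := hu
  have hGne : G ≠ 0 := by omega
  have hmodnn : 0 ≤ (2*g+r) % G := Int.emod_nonneg _ hGne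
  have hmodlt : (2*g+r) % G < G := Int.emod_lt_of_pos _ hG
  have hdef : (2*g+r) % G = (2*g+r) - G * ((2*g+r) / G) := Int.emod_def _ _
  rcases hu with hu | hu
  · subst hu
    simp only [PySem.Int.mod_eq_emod_of_pos hG] at h1 h2 ⊢
    have e1 : (2*g+r) - G * ((2*g+r) / G) = (i : Int) := by rw [← hdef]; omega
    have e2 : g = (j : Int) := by omega
    have hs : ((i : Int) + 1 - (j : Int)) % G = (j : Int) + r + 1 := by
      apply emod_eq_of_dvd_sub
      · exact ⟨-((2*g+r) / G), by linear_combination (-1 : Int) * e1 + 2 * e2⟩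
      · omega
      · omega
    rw [hs, min_eq_right (by omega)]
    exact e2
  · subst hu
    simp only [PySem.Int.mod_eq_emod_of_pos hG] at h1 h2 ⊢
    have e1 : (2*g+r) - G * ((2*g+r) / G) = (i : Int) := by rw [← hdef]; omega
    have e2 : g + r + 1 = (j : Int) := by omega
    have hs : ((i : Int) + 1 - (j : Int)) % G = g := by
      apply emod_eq_of_dvd_sub
      · exact ⟨-((2*g+r) / G), by linear_combination (-1 : Int) * e1 + e2⟩
      · omega
      · omega
    rw [hs, min_eq_left (by omega)]

-- if the closed form is below j, some write hits cell (i, j)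
lemma upds_hit (G : Int) (hG : 0 < G) (i j : Nat) (hi : (i : Int) < G) (hj : (j : Int) < G)
    (hs : ((i : Int) + 1 - (j : Int)) % G < (j : Int)) :
    (pvUpds G).any (fun u => u.1.toNat == i && u.2.1.toNat == j) = true := by
  rw [List.any_eq_true]
  have hGne : G ≠ 0 := by omega
  have hs0 : 0 ≤ ((i : Int) + 1 - (j : Int)) % G := Int.emod_nonneg _ hGne
  have hq : ((i : Int) + 1 - (j : Int)) % G
      = ((i : Int) + 1 - (j : Int)) - G * (((i : Int) + 1 - (j : Int)) / G) := Int.emod_def _ _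
  refine ⟨(PySem.Int.mod (2 * (((i : Int) + 1 - (j : Int)) % G)
              + ((j : Int) - ((i : Int) + 1 - (j : Int)) % G - 1)) G,
          ((i : Int) + 1 - (j : Int)) % G + ((j : Int) - ((i : Int) + 1 - (j : Int)) % G - 1) + 1,
          ((i : Int) + 1 - (j : Int)) % G), ?_, ?_⟩
  · simp only [pvUpds, List.mem_flatMap, PySem.List.mem_pyRange_one, List.mem_cons,
      List.not_mem_nil, or_false]
    exact ⟨_, ⟨hs0, by omega⟩, _, ⟨by omega, by omega⟩, Or.inr rfl⟩
  · dsimp only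
    rw [Bool.and_eq_true, beq_iff_eq, beq_iff_eq]
    constructor
    · rw [PySem.Int.mod_eq_emod_of_pos hG]
      have hm : (2 * (((i : Int) + 1 - (j : Int)) % G)
          + ((j : Int) - ((i : Int) + 1 - (j : Int)) % G - 1)) % G = (i : Int) := by
        apply emod_eq_of_dvd_sub
        · exact ⟨-(((i : Int) + 1 - (j : Int)) / G), by linear_combination hq⟩
        · omega
        · omega
      omega
    · omega

-- second pass: one outer iteration factors into replacing row i
def pvRowF (js : List Int) (row : List (Option Int)) : List (Option Int) :=
  js.foldl (fun row x => if row.getD x.toNat none = none then row.set x.toNat (some x) else row) row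

lemma inner_factor (js : List Int) (m : List (List (Option Int))) (i : Int)
    (hi : i.toNat < m.length) :
    js.foldl (fun B j => if pvGetCell B i j = none then pvSetCell B i j j else B) m
      = m.set i.toNat (pvRowF js (m.getD i.toNat [])) := by
  revert m
  induction js with
  | nil =>
    intro m hi
    rw [List.foldl_nil]
    unfold pvRowF
    rw [List.foldl_nil, List.getD_eq_getElem _ _ hi, List.set_getElem_self]
  | cons x rest ih =>
    intro m hi
    rw [List.foldl_cons]
    unfold pvRowF
    rw [List.foldl_cons]
    by_cases c : (m.getD i.toNat []).getD x.toNat none = none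
    · rw [if_pos (show pvGetCell m i x = none from c), if_pos c]
      have hstep : pvSetCell m i x x
          = m.set i.toNat ((m.getD i.toNat []).set x.toNat (some x)) := rfl
      rw [hstep, ih _ (by rw [List.length_set]; exact hi),
        getD_set_self _ _ _ _ hi, List.set_set]
      rfl
    · rw [if_neg (show ¬ pvGetCell m i x = none from c), if_neg c]
      exact ih m hi

lemma pass2_eq (is js : List Int) (B : List (List (Option Int))) (n : Nat)
    (hB : B.length = n) (h : ∀ x ∈ is, x.toNat < n) :
    is.foldl (fun B i =>
      js.foldl (fun B j => if pvGetCell B i j = none then pvSetCell B i j j else B) B) B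
    = is.foldl (fun B x => B.set x.toNat (pvRowF js (B.getD x.toNat []))) B := by
  revert hB h
  revert B
  induction is with
  | nil => intro B _ _; rfl
  | cons x rest ih =>
    intro B hB h
    rw [List.foldl_cons, List.foldl_cons,
      inner_factor js B x (by rw [hB]; exact h x (by simp))]
    exact ih _ (by rw [List.length_set]; exact hB) (fun y hy => h y (by simp [hy]))

-- a nodup list of naturals has at most one element equal to i
lemma length_filter_eq_le_one (l : List Nat) (hl : l.Nodup) (i : Nat) :
    (l.filter (fun k => k == i)).length ≤ 1 := by
  induction l with
  | nil => simp
  | cons a t ih =>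
    rw [List.filter_cons]
    rcases List.nodup_cons.mp hl with ⟨ha, ht⟩
    by_cases h : a = i
    · subst h
      have : t.filter (fun k => k == a) = [] :=
        List.filter_eq_nil_iff.mpr (fun b hb hba => ha (by simpa using (beq_iff_eq.mp hba) ▸ hb))
      simp [this]
    · simpa [h] using ih ht

lemma filter_toNat_pyRange (G : Int) (i : Nat) :
    ((PySem.List.pyRange 0 G 1).filter (fun x => x.toNat == i)).length ≤ 1 := by
  rw [PySem.List.pyRange_one, List.filter_map]
  rw [List.filter_congr (q := fun k => k == i) (by intro x _; simp)]
  rw [List.length_map]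
  exact length_filter_eq_le_one _ List.nodup_range i

-- row i after folding per-row replacements over a list with at most one hit
lemma setmap_fold_row {α : Type} (is : List Int) (m : List α) (i : Nat) (f : α → α) (d : α)
    (hi : i < m.length)
    (hcnt : (is.filter (fun x => x.toNat == i)).length ≤ 1) :
    ((is.foldl (fun m x => m.set x.toNat (f (m.getD x.toNat d))) m).getD i d)
      = if is.any (fun x => x.toNat == i) then f (m.getD i d) else m.getD i d := by
  revert hcnt
  revert m
  induction is with
  | nil => intro m _ _; simp
  | cons x rest ih =>
    intro m hi hcnt
    rw [List.foldl_cons, List.any_cons]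
    by_cases h : x.toNat = i
    · rw [List.filter_cons, if_pos (by simp [h])] at hcnt
      have hrest : rest.filter (fun y => y.toNat == i) = [] := by
        rw [← List.length_eq_zero_iff]
        simpa using hcnt
      have hany : rest.any (fun y => y.toNat == i) = false :=
        List.any_eq_false.mpr (fun y hy hyp => List.filter_eq_nil_iff.mp hrest y hy hyp)
      rw [ih (m.set x.toNat (f (m.getD x.toNat d))) (by rw [List.length_set]; exact hi)
        (by simp [hrest]), hany, h, getD_set_self _ _ _ _ hi]
      simp
    · rw [List.filter_cons, if_neg (by simp [h])] at hcnt
      rw [ih (m.set x.toNat (f (m.getD x.toNat d))) (by rw [List.length_set]; exact hi) hcnt,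
        getD_set_ne _ _ _ _ _ h]
      have hhead : (x.toNat == i) = false := by simp [h]
      rw [hhead, Bool.false_or]

-- entry j of a resolved row
lemma rowF_cell (js : List Int) (row : List (Option Int)) (j : Nat) (v : Int)
    (hj : j < row.length) (hv : ∀ x ∈ js, x.toNat = j → x = v) :
    (pvRowF js row).getD j none
      = if js.any (fun x => x.toNat == j) = true ∧ row.getD j none = none
        then some v else row.getD j none := by
  revert hv
  revert row
  induction js with
  | nil => intro row hj hv; simp [pvRowF]
  | cons x rest ih =>
    intro row hj hv
    unfold pvRowF
    rw [List.foldl_cons, List.any_cons]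
    have hv' : ∀ y ∈ rest, y.toNat = j → y = v := fun y hy => hv y (by simp [hy])
    by_cases hx : x.toNat = j
    · have hxv : x = v := hv x (by simp) hx
      by_cases hc : row.getD j none = none
      · rw [show (if row.getD x.toNat none = none then row.set x.toNat (some x) else row)
              = row.set j (some v) by rw [hx, hxv, if_pos (hx ▸ hc)]]
        have hr := ih (row.set j (some v)) (by rw [List.length_set]; exact hj) hv'
        unfold pvRowF at hr
        rw [hr, getD_set_self _ _ _ _ hj]
        rw [List.getD_eq_getElem?_getD] at hc
        simp [hx, hc]
      · rw [show (if row.getD x.toNat none = none then row.set x.toNat (some x) else row)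
              = row by rw [hx, if_neg hc]]
        have hr := ih row hj hv'
        unfold pvRowF at hr
        rw [hr]
        rw [List.getD_eq_getElem?_getD] at hc
        simp [hc]
    · have hhead : (x.toNat == j) = false := by simp [hx]
      by_cases hc : row.getD x.toNat none = none
      · rw [if_pos hc]
        have hr := ih (row.set x.toNat (some x)) (by rw [List.length_set]; exact hj) hv'
        unfold pvRowF at hr
        rw [hr, getD_set_ne _ _ _ _ _ hx, hhead, Bool.false_or]
      · rw [if_neg hc]
        have hr := ih row hj hv'
        unfold pvRowF at hr
        rw [hr, hhead, Bool.false_or]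

lemma len_setfold {α : Type} (is : List Int) (m : List α) (f : α → α) (d : α) :
    (is.foldl (fun m x => m.set x.toNat (f (m.getD x.toNat d))) m).length = m.length := by
  revert m
  induction is with
  | nil => intro m; rfl
  | cons x rest ih => intro m; rw [List.foldl_cons, ih, List.length_set]

lemma len_rowF (js : List Int) (row : List (Option Int)) :
    (pvRowF js row).length = row.length := by
  revert row
  induction js with
  | nil => intro row; rfl
  | cons x rest ih =>
    intro row
    unfold pvRowF
    rw [List.foldl_cons]
    by_cases c : row.getD x.toNat none = none
    · rw [if_pos c]
      have := ih (row.set x.toNat (some x))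
      unfold pvRowF at this
      rw [this, List.length_set]
    · rw [if_neg c]
      exact ih row

-- ===== VERDICT (by name: the statement is the Claim_ definition above) =====
theorem SS_Matrix_spec : Claim_equal_SS_Matrix := by
  intro G _
  unfold Spec_SS_Matrix SS_Matrix SS_Matrix_alt
  by_cases hG : 0 < G
  · dsimp only
    rw [fill_eq_upds]
    set n := G.toNat with hndef
    have hnG : (n : Int) = G := Int.toNat_of_nonneg (le_of_lt hG)
    have hlen : (PySem.List.pyRange 0 G 1).length = n := by
      rw [PySem.List.length_pyRange_one]; omega
    have hB0 : ((PySem.List.pyRange 0 G 1).map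
          (fun _ => (PySem.List.pyRange 0 G 1).map (fun _ => (none : Option Int))))
        = List.replicate n (List.replicate n (none : Option Int)) := by
      rw [List.map_const', List.map_const', hlen]
    rw [hB0]
    set us := pvUpds G with husdef
    set B1 := us.foldl pvUpd (List.replicate n (List.replicate n (none : Option Int))) with hB1def
    have hB1len : B1.length = n := by rw [hB1def, len_foldl_upd, List.length_replicate]
    have hB1row : ∀ k, k < n → (B1.getD k []).length = n := by
      intro k hk
      rw [hB1def, rowlen_foldl_upd, List.getD_replicate _ hk, List.length_replicate]
    rw [pass2_eq _ _ _ n hB1len (fun x hx => by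
      have := PySem.List.mem_pyRange_one.mp hx; omega)]
    set B2 := (PySem.List.pyRange 0 G 1).foldl
      (fun B x => B.set x.toNat (pvRowF (PySem.List.pyRange 0 G 1) (B.getD x.toNat []))) B1 with hB2def
    have hB2len : B2.length = n := by rw [hB2def, len_setfold, hB1len]
    apply List.ext_getElem
    · rw [List.length_map, hB2len, List.length_map, hlen]
    intro k hk1 hk2
    have hkn : k < n := by rw [List.length_map, hB2len] at hk1; exact hk1
    have hanyk : (PySem.List.pyRange 0 G 1).any (fun x => x.toNat == k) = true :=
      List.any_eq_true.mpr ⟨(k : Int), PySem.List.mem_pyRange_one.mpr ⟨by omega, by omega⟩, by simp⟩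
    have hrowk : B2.getD k [] = pvRowF (PySem.List.pyRange 0 G 1) (B1.getD k []) := by
      rw [hB2def, setmap_fold_row _ _ _ _ _ (by rw [hB1len]; exact hkn) (filter_toNat_pyRange G k)]
      simp [hanyk]
    have hBk : B2[k] = pvRowF (PySem.List.pyRange 0 G 1) (B1.getD k []) := by
      rw [← hrowk]
      exact (List.getD_eq_getElem _ _ (by rw [hB2len]; exact hkn)).symm
    rw [List.getElem_map, List.getElem_map, PySem.List.getElem_pyRange_one]
    apply List.ext_getElem
    · simp only [List.length_map, hBk, len_rowF, hlen, hB1row k hkn]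
    intro j hj1 hj2
    have hjn : j < n := by rw [List.length_map, hlen] at hj2; exact hj2
    rw [List.getElem_map, List.getElem_map, PySem.List.getElem_pyRange_one]
    have hcell2 : (B2[k])[j]'(by rw [List.length_map] at hj1; exact hj1)
        = (pvRowF (PySem.List.pyRange 0 G 1) (B1.getD k [])).getD j none := by
      rw [← List.getD_eq_getElem (B2[k]) none, hBk]
    set v := min (((k : Int) + 1 - (j : Int)) % G) (j : Int) with hv
    have hb1cell : (B1.getD k []).getD j none
        = if us.any (fun u => u.1.toNat == k && u.2.1.toNat == j) then some v else none := by
      rw [hB1def, foldl_upd_cell us _ k j v (by rw [List.length_replicate]; exact hkn)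
        (by rw [List.getD_replicate _ hkn, List.length_replicate]; exact hjn)
        (by rw [husdef]; exact upds_value G hG k j),
        List.getD_replicate _ hkn, List.getD_replicate _ hjn]
    have hrowcell := rowF_cell (PySem.List.pyRange 0 G 1) (B1.getD k []) j (j : Int)
      (by rw [hB1row k hkn]; exact hjn)
      (fun x hx hxj => by have := PySem.List.mem_pyRange_one.mp hx; omega)
    by_cases hhit : us.any (fun u => u.1.toNat == k && u.2.1.toNat == j) = true
    · have hsome : (B1.getD k []).getD j none = some v := by rw [hb1cell, if_pos hhit]
      rw [hcell2, hrowcell, hsome]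
      rw [PySem.Int.mod_eq_emod_of_pos hG]
      simp [hv]
    · have hB1none : (B1.getD k []).getD j none = none := by rw [hb1cell, if_neg hhit]
      have hjle : ¬ (((k : Int) + 1 - (j : Int)) % G < (j : Int)) := fun hlt =>
        hhit (by rw [husdef]; exact upds_hit G hG k j (by omega) (by omega) hlt)
      have hanyj : (PySem.List.pyRange 0 G 1).any (fun x => x.toNat == j) = true :=
        List.any_eq_true.mpr ⟨(j : Int), PySem.List.mem_pyRange_one.mpr ⟨by omega, by omega⟩, by simp⟩
      rw [hcell2, hrowcell, hB1none, if_pos ⟨hanyj, rfl⟩]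
      rw [PySem.Int.mod_eq_emod_of_pos hG]
      have e : (0 + (k : Int) + 1 - (0 + (j : Int))) = ((k : Int) + 1 - (j : Int)) := by ring
      have e2 : (0 : Int) + (j : Int) = (j : Int) := by ring
      rw [e, e2, min_eq_right (not_lt.mp hjle)]
      simp
  · rw [PySem.List.pyRange_one_eq_nil (by omega : G ≤ (0 : Int)),
      PySem.List.pyRange_one_eq_nil (by omega : G - 1 ≤ (0 : Int))]
    simp
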